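-- pv_equiv track=rewrite | github.com/mobiniqow/rabiie | device/models.py | _time_to_binary
-- ===== SOURCE A (Python) =====
-- def _time_to_binary(start, end):
--     day = 24
--     result = ""
--     for i in range(day):
--         if start <= i + 1 <= end:
--             result += "1"
--         else:
--             result += "0"
--     return result
-- ===== SOURCE B (Python) =====
-- def _time_to_binary(start, end):
--     a = max(1, start)
--     b = min(24, end)
--     if a > b:
--         return "0" * 24
--     return "0" * (a - 1) + "1" * (b - a + 1) + "0" * (24 - b)
-- ===== Notes on version B (the rewrite author's own statement) =====
-- stated objective: simpler
-- what changed: Replaced the 24-iteration loop testing each hour with a closed-form band: clamp start/end to [1,24] and assemble the string directly as '0'*(a-1)+'1'*(b-a+1)+'0'*(24-b).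
import Mathlib
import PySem

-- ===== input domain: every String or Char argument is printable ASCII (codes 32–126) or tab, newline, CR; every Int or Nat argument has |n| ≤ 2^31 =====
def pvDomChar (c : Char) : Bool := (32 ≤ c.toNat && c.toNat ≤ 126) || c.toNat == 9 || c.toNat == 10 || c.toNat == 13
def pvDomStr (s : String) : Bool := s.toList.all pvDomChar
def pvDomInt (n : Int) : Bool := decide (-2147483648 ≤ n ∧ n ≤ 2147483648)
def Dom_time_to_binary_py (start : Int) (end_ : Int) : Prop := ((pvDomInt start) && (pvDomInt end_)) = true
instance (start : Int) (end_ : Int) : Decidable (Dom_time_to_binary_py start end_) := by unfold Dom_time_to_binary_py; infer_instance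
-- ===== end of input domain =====

-- B replaces the 24-iteration loop with closed-form band assembly (objective: simpler).
-- ===== PORT A =====
def time_to_binary_py (start : Int) (end_ : Int) : String :=
  let day : Int := 24
  (PySem.List.pyRange 0 day 1).foldl
    (fun result i => result ++ (if start ≤ i + 1 ∧ i + 1 ≤ end_ then "1" else "0")) ""

-- ===== PORT B =====
def time_to_binary_py_alt (start : Int) (end_ : Int) : String :=
  let a : Int := max 1 start
  let b : Int := min 24 end_
  if a > b then String.mk (List.replicate 24 '0')
  else String.mk (List.replicate (a - 1).toNat '0' ++
                  List.replicate (b - a + 1).toNat '1' ++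
                  List.replicate (24 - b).toNat '0')

-- ===== PRECONDITION & SPEC =====
def Spec_time_to_binary_py (start : Int) (end_ : Int) (out : String) : Prop := out = time_to_binary_py_alt start end_
instance (start : Int) (end_ : Int) (out : String) : Decidable (Spec_time_to_binary_py start end_ out) := by unfold Spec_time_to_binary_py; infer_instance

-- ===== CLAIM (what is proved, stated in full; the proofs are below) =====
def Claim_equal_time_to_binary_py : Prop := ∀ (start : Int) (end_ : Int), Dom_time_to_binary_py start end_ → Spec_time_to_binary_py start end_ (time_to_binary_py start end_)

-- ===== LEMMAS AND PROOFS =====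
-- Both ports depend on start/end_ only through their clamped values.
def pvClampS (s : Int) : Int := max 1 (min 25 s)
def pvClampE (e : Int) : Int := max 0 (min 24 e)

lemma pvFoldA_clamp (s e : Int) (l : List Int) (hl : ∀ i ∈ l, 0 ≤ i ∧ i < 24) (acc : String) :
    l.foldl (fun result i => result ++ (if s ≤ i + 1 ∧ i + 1 ≤ e then "1" else "0")) acc
      = l.foldl (fun result i =>
          result ++ (if pvClampS s ≤ i + 1 ∧ i + 1 ≤ pvClampE e then "1" else "0")) acc := by
  induction l generalizing acc with
  | nil => rfl
  | cons i t ih =>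
    simp only [List.foldl_cons]
    have hiff : (s ≤ i + 1 ∧ i + 1 ≤ e) ↔ (pvClampS s ≤ i + 1 ∧ i + 1 ≤ pvClampE e) := by
      have := hl i (by simp); simp only [pvClampS, pvClampE]; omega
    simp only [hiff]
    exact ih (fun j hj => hl j (by simp [hj])) _

lemma pvA_clamp (s e : Int) :
    time_to_binary_py s e = time_to_binary_py (pvClampS s) (pvClampE e) := by
  unfold time_to_binary_py
  have h25 : pvClampS (pvClampS s) = pvClampS s := by unfold pvClampS; omega
  have h24 : pvClampE (pvClampE e) = pvClampE e := by unfold pvClampE; omega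
  rw [pvFoldA_clamp s e _ (by decide), pvFoldA_clamp (pvClampS s) (pvClampE e) _ (by decide), h25, h24]

lemma pvB_clamp (s e : Int) :
    time_to_binary_py_alt s e = time_to_binary_py_alt (pvClampS s) (pvClampE e) := by
  unfold time_to_binary_py_alt
  dsimp only
  by_cases hs : s ≤ 25
  · by_cases he : 0 ≤ e
    · have h1 : max 1 (pvClampS s) = max 1 s := by unfold pvClampS; omega
      have h2 : min 24 (pvClampE e) = min 24 e := by unfold pvClampE; omega
      rw [h1, h2]
    · rw [if_pos (by omega), if_pos (by unfold pvClampS pvClampE; omega)]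
  · rw [if_pos (by omega), if_pos (by unfold pvClampS pvClampE; omega)]

lemma pvKey : ∀ a ∈ Finset.Icc (1 : Int) 25, ∀ b ∈ Finset.Icc (0 : Int) 24,
    time_to_binary_py a b = time_to_binary_py_alt a b := by decide

-- ===== VERDICT =====
theorem time_to_binary_py_spec : Claim_equal_time_to_binary_py := by
  intro s e _
  unfold Spec_time_to_binary_py
  rw [pvA_clamp, pvB_clamp]
  exact pvKey _ (by rw [Finset.mem_Icc]; unfold pvClampS; omega) _ (by rw [Finset.mem_Icc]; unfold pvClampE; omega)
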